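-- pv_equiv track=rewrite | github.com/Rachel-3/2024-Algorithm-Study | chaerim/Programmers/Level_0/Lv0_카운트_다운.py | solution
-- ===== SOURCE A (Python) =====
-- def solution(start, end_num):
--     answer = []
--
--     for i in range(start, -1, -1):
--         if i != end_num:
--             answer.append(i)
--         else:
--             answer.append(i)
--             break
--
--     return answer
-- ===== SOURCE B (Python) =====
-- def solution(start, end_num):
--     full = list(range(start, -1, -1))
--     try:
--         return full[:full.index(end_num) + 1]
--     except ValueError:
--         return full
-- ===== Notes on version B (the rewrite author's own statement) =====
-- stated objective: alternative
-- what changed: B builds the whole descending range once and cuts it at the first occurrence of end_num with index/slice (falling back to the full list on ValueError), instead of A's incremental append-until-break loop.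
import Mathlib
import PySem

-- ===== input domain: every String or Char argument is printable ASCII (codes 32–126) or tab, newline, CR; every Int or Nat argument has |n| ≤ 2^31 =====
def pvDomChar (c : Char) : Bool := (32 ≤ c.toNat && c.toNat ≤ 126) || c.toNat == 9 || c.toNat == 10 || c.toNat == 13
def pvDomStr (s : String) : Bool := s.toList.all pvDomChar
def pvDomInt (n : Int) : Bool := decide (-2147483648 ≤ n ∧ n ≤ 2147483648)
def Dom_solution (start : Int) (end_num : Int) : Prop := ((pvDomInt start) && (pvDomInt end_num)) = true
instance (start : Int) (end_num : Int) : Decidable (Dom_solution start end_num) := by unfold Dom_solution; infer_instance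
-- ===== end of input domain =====

-- B builds the full descending range once and cuts at end_num via index/slice, instead of A's append-until-break loop (alternative decomposition, same cost).


-- ===== PORT A =====
-- the for-loop with its append-and-break, as structural recursion over the range list
def solutionLoop (end_num : Int) : List Int → List Int
  | [] => []
  | i :: rest => if i ≠ end_num then i :: solutionLoop end_num rest else [i]

def solution (start : Int) (end_num : Int) : List Int :=
  solutionLoop end_num (PySem.List.pyRange start (-1) (-1))

-- ===== PORT B =====
def solution_alt (start : Int) (end_num : Int) : List Int :=
  let full := PySem.List.pyRange start (-1) (-1)
  match PySem.List.index? full end_num with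
  | some idx => PySem.List.slice full none (some ((idx : Int) + 1))
  | none => full

-- ===== PRECONDITION & SPEC =====
def Spec_solution (start : Int) (end_num : Int) (out : List Int) : Prop := out = solution_alt start end_num
instance (start : Int) (end_num : Int) (out : List Int) : Decidable (Spec_solution start end_num out) := by unfold Spec_solution; infer_instance

-- ===== CLAIM (what is proved, stated in full; the proofs are below) =====
def Claim_equal_solution : Prop := ∀ (start : Int) (end_num : Int), Dom_solution start end_num → Spec_solution start end_num (solution start end_num)

-- ===== LEMMAS AND PROOFS =====
theorem solutionLoop_eq (e : Int) (l : List Int) :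
    solutionLoop e l = match PySem.List.index? l e with
      | some k => l.take (k + 1)
      | none => l := by
  induction l with
  | nil => simp [solutionLoop]
  | cons x xs ih =>
    by_cases hx : x = e
    · subst hx
      rw [PySem.List.index?_cons_self]
      simp [solutionLoop]
    · rw [PySem.List.index?_cons_of_ne xs hx]
      simp only [solutionLoop, if_pos (by exact hx)]
      rw [ih]
      cases PySem.List.index? xs e <;> simp

-- ===== VERDICT (by name: the statement is the Claim_ definition above) =====
theorem solution_spec : Claim_equal_solution := by
  intro start end_num _
  unfold Spec_solution solution solution_alt
  rw [solutionLoop_eq]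
  cases h : PySem.List.index? (PySem.List.pyRange start (-1) (-1)) end_num with
  | none => simp only [h]
  | some k =>
    simp only [h]
    rw [show ((k : Int) + 1) = ((k + 1 : Nat) : Int) from by push_cast; ring,
        PySem.List.slice_to_natCast]
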